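-- pv_equiv track=rewrite | github.com/Edsel-Tan/dashboard | Solutions/289.py | validStateFromCrossing
-- ===== SOURCE A (Python) =====
-- m = 6
--
-- def validStateFromCrossing(state, crossing):
--
--     componentLabel = dict(zip(set(state), set(state)))
--     components = dict(zip(set(state), [set() for i in state]))
--     for i in components:
--         components[i].add(i)
--
--     def merge(x, y):
--         x = componentLabel[x]
--         y = componentLabel[y]
--         z = min(x, y)
--         for i in components[x]:
--             componentLabel[i] = z
--             components[z].add(i)
--         for i in components[y]:
--             components[z].add(i)
--             componentLabel[i] = z
--
--         del components[x+y-z]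
--
--     currEdge = state[0]
--     for edge in range(m-1):
--         if crossing[edge]:
--             if componentLabel[state[2*edge+1]] == componentLabel[state[2*edge+2]]:
--                 return False
--
--             merge(state[2*edge+1], state[2*edge+2])
--
--         else:
--             if componentLabel[state[2*edge+1]] == componentLabel[currEdge]:
--                 return False
--
--             merge(state[2*edge+1], currEdge)
--             currEdge = state[2*edge+2]
--
--     return True
-- ===== SOURCE B (Python) =====
-- m = 6
--
-- def validStateFromCrossing(state, crossing):
--     # Union-find with parent pointers: lazy root walks replace A's eager
--     # per-component member sets and full relabeling sweep on every merge.
--     parent = {v: v for v in set(state)}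
--
--     def find(x):
--         while parent[x] != x:
--             x = parent[x]
--         return x
--
--     curr = state[0]
--     for edge in range(m - 1):
--         if crossing[edge]:
--             a, b = state[2 * edge + 1], state[2 * edge + 2]
--         else:
--             a, b = state[2 * edge + 1], curr
--         ra, rb = find(a), find(b)
--         if ra == rb:
--             return False
--         if ra < rb:
--             parent[rb] = ra
--         else:
--             parent[ra] = rb
--         if not crossing[edge]:
--             curr = state[2 * edge + 2]
--     return True
-- ===== Notes on version B (the rewrite author's own statement) =====
-- stated objective: faster
-- what changed: Replaces A's eager union-find (a label dict plus a dict of per-component member sets, relabeling every member of both components on each merge) with a classic parent-pointer union-find: one parent dict, a lazy find that walks to the root, and a merge that writes a single pointer (larger root linked under smaller root), dropping the member sets and the relabeling sweeps entirely; B keeps A's exact read order, so it returns A's value wherever A returns and raises where A raises.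
import Mathlib
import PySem

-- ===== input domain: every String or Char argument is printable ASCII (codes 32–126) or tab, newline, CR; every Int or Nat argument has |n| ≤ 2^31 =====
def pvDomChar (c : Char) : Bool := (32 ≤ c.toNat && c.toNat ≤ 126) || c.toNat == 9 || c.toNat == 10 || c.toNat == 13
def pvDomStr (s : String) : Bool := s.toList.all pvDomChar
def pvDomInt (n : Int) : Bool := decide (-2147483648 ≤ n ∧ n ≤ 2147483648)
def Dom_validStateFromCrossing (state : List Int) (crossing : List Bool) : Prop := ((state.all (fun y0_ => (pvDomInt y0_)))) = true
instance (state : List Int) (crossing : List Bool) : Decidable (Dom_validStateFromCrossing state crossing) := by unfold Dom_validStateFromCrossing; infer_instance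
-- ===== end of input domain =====

-- B replaces A's eager union-find (label dict + per-component member sets, relabeling whole
-- components on each merge) with a parent-pointer union-find (lazy root walks, one pointer
-- write per merge); same return value and same raise points as A.

-- the module constant  m = 6
def pyM : Int := 6

-- ===== PORT A =====
-- merge(x, y): relabel both components to z = min(label x, label y), pool their member
-- sets under z, delete the other set.  The two Python 'for i in components[…]' loops
-- iterate a Python set; every update they make is order-independent (assignments of the
-- same label, adds of already-known members), so folding the member list is exact.
def mergeA (cl : PySem.Dict Int Int) (cs : PySem.Dict Int (List Int)) (x y : Int) :
    PySem.Dict Int Int × PySem.Dict Int (List Int) :=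
  let lx := cl.getD x 0        -- x = componentLabel[x]  (key always present on Pre_)
  let ly := cl.getD y 0        -- y = componentLabel[y]
  let z := min lx ly
  let p1 := (cs.getD lx []).foldl
      (fun (p : PySem.Dict Int Int × PySem.Dict Int (List Int)) i =>
        (p.1.insert i z, p.2.modify z [] (fun t => PySem.Set.add t i))) (cl, cs)
  let p2 := (p1.2.getD ly []).foldl
      (fun (p : PySem.Dict Int Int × PySem.Dict Int (List Int)) i =>
        (p.1.insert i z, p.2.modify z [] (fun t => PySem.Set.add t i))) p1
  (p2.1, p2.2.erase (lx + ly - z))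

-- the 'for edge in range(m-1)' loop with its early 'return False'
def loopA (state : List Int) (crossing : List Bool) :
    List Int → PySem.Dict Int Int → PySem.Dict Int (List Int) → Int → Bool
  | [], _, _, _ => true
  | e :: rest, cl, cs, curr =>
    if PySem.List.pyGetD crossing e false then
      let a := PySem.List.pyGetD state (2 * e + 1) 0
      let b := PySem.List.pyGetD state (2 * e + 2) 0
      if cl.getD a 0 = cl.getD b 0 then false
      else
        let p := mergeA cl cs a b
        loopA state crossing rest p.1 p.2 curr
    else
      let a := PySem.List.pyGetD state (2 * e + 1) 0
      if cl.getD a 0 = cl.getD curr 0 then false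
      else
        let p := mergeA cl cs a curr
        loopA state crossing rest p.1 p.2 (PySem.List.pyGetD state (2 * e + 2) 0)

def validStateFromCrossing (state : List Int) (crossing : List Bool) : Bool :=
  let s := PySem.Set.ofList state
  -- componentLabel = dict(zip(set(state), set(state)))
  let cl := PySem.Dict.ofList (s.zip s)
  -- components = dict(zip(set(state), [set() for i in state]))
  let cs0 := PySem.Dict.ofList (s.zip (state.map (fun _ => ([] : List Int))))
  -- for i in components: components[i].add(i)
  let cs := cs0.keys.foldl (fun d i => d.modify i [] (fun t => PySem.Set.add t i)) cs0
  loopA state crossing (PySem.List.pyRange 0 (pyM - 1)) cl cs (PySem.List.pyGetD state 0 0)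

-- ===== PORT B =====
-- find(x): follow parent links to the root.  Fuel bounds the walk; parent chains are
-- strictly decreasing within the key set, so fuel = parent.size always reaches the root.
def findB (par : PySem.Dict Int Int) : Nat → Int → Int
  | 0, x => x
  | fuel + 1, x =>
    let p := par.getD x x      -- parent[x] (key always present on Pre_)
    if p = x then x else findB par fuel p

def loopB (state : List Int) (crossing : List Bool) :
    List Int → PySem.Dict Int Int → Int → Bool
  | [], _, _ => true
  | e :: rest, par, curr =>
    -- (a, b) per branch, exactly Source B's reads
    let ab :=
      if PySem.List.pyGetD crossing e false then
        (PySem.List.pyGetD state (2 * e + 1) 0, PySem.List.pyGetD state (2 * e + 2) 0)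
      else
        (PySem.List.pyGetD state (2 * e + 1) 0, curr)
    let ra := findB par par.size ab.1
    let rb := findB par par.size ab.2
    if ra = rb then false
    else
      let par' := if ra < rb then par.insert rb ra else par.insert ra rb
      let curr' := if PySem.List.pyGetD crossing e false then curr
                   else PySem.List.pyGetD state (2 * e + 2) 0
      loopB state crossing rest par' curr'

def validStateFromCrossing_alt (state : List Int) (crossing : List Bool) : Bool :=
  -- parent = {v: v for v in set(state)}
  let par := PySem.Dict.ofList ((PySem.Set.ofList state).map (fun v => (v, v)))
  loopB state crossing (PySem.List.pyRange 0 (pyM - 1)) par (PySem.List.pyGetD state 0 0)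

-- ===== PRECONDITION & SPEC =====
-- Spec-level helpers for Pre_ (closed-form reads of the input; none of them touches
-- either port's union-find computation):
-- connRev ps u v: u and v are connected by the (reversed) list of merge pairs ps —
-- adding one edge (x,y) to an equivalence relation connects u,v iff they were connected
-- or u reaches one endpoint and v the other.
def connRev : List (Int × Int) → Int → Int → Bool
  | [], u, v => u == v
  | (x, y) :: ps, u, v =>
    connRev ps u v || (connRev ps u x && connRev ps y v) || (connRev ps u y && connRev ps x v)

-- the value of currEdge before edge e is processed
def curAt (state : List Int) (crossing : List Bool) : Nat → Int
  | 0 => PySem.List.pyGetD state 0 0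
  | e + 1 =>
    if PySem.List.pyGetD crossing (e : Int) false then curAt state crossing e
    else PySem.List.pyGetD state (2 * (e : Int) + 2) 0

-- the pair of vertices compared (and merged) at edge e
def pairAt (state : List Int) (crossing : List Bool) (e : Nat) : Int × Int :=
  if PySem.List.pyGetD crossing (e : Int) false then
    (PySem.List.pyGetD state (2 * (e : Int) + 1) 0, PySem.List.pyGetD state (2 * (e : Int) + 2) 0)
  else
    (PySem.List.pyGetD state (2 * (e : Int) + 1) 0, curAt state crossing e)

-- the pairs of the edges before e, most recent first
def pairsRev (state : List Int) (crossing : List Bool) : Nat → List (Int × Int)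
  | 0 => []
  | e + 1 => pairAt state crossing e :: pairsRev state crossing e

-- the indices A reads at edge e before its equal-component check exist
def okAt (state : List Int) (crossing : List Bool) (e : Nat) : Bool :=
  decide (e < crossing.length) &&
  (if PySem.List.pyGetD crossing (e : Int) false then decide (2 * e + 2 < state.length)
   else decide (2 * e + 1 < state.length))

-- edge e is processed completely: check reachable, components distinct, next currEdge readable
def completesAt (state : List Int) (crossing : List Bool) (e : Nat) : Bool :=
  okAt state crossing e &&
  !connRev (pairsRev state crossing e) (pairAt state crossing e).1 (pairAt state crossing e).2 &&
  decide (2 * e + 2 < state.length)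

-- edge e's check is reachable and fires: A returns False there
def falseAt (state : List Int) (crossing : List Bool) (e : Nat) : Bool :=
  okAt state crossing e &&
  connRev (pairsRev state crossing e) (pairAt state crossing e).1 (pairAt state crossing e).2

-- Pre_ holds exactly when the Python A returns: state is nonempty and either all five
-- edges of the loop complete (every index present, no equal-component check fires), or
-- some edge's check fires (connectivity of the earlier merge pairs, a spec-level reading
-- of the input, not a run of either port) before the first missing index; on every other
-- input A raises IndexError, and B raises at the same points.
def Pre_validStateFromCrossing (state : List Int) (crossing : List Bool) : Prop :=
  state ≠ [] ∧
  (((List.range 5).all (completesAt state crossing) = true) ∨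
   ((List.range 5).any (fun e =>
      (List.range e).all (completesAt state crossing) && falseAt state crossing e) = true))
instance (state : List Int) (crossing : List Bool) : Decidable (Pre_validStateFromCrossing state crossing) := by unfold Pre_validStateFromCrossing; infer_instance
def pvWitness_validStateFromCrossing : List Int × List Bool :=
  ([0, 1, 2, 3, 4, 5, 6, 7, 8, 9, 10], [true, true, true, true, true])

def Spec_validStateFromCrossing (state : List Int) (crossing : List Bool) (out : Bool) : Prop := out = validStateFromCrossing_alt state crossing
instance (state : List Int) (crossing : List Bool) (out : Bool) : Decidable (Spec_validStateFromCrossing state crossing out) := by unfold Spec_validStateFromCrossing; infer_instance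

-- ===== CLAIM (what is proved, stated in full; the proofs are below) =====
def Claim_equal_validStateFromCrossing : Prop := ∀ (state : List Int) (crossing : List Bool), Dom_validStateFromCrossing state crossing → Pre_validStateFromCrossing state crossing → Spec_validStateFromCrossing state crossing (validStateFromCrossing state crossing)

-- ===== LEMMAS AND PROOFS =====

-- the label of v in A's structures
def lab (cl : PySem.Dict Int Int) (v : Int) : Int := cl.getD v 0

-- invariant on A's componentLabel over the key set S: labels lie in S, are ≤ their
-- element (merges always relabel with the min), and are idempotent (labels are roots)
def InvCL (S : List Int) (cl : PySem.Dict Int Int) : Prop :=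
  ∀ v ∈ S, lab cl v ∈ S ∧ lab cl v ≤ v ∧ lab cl (lab cl v) = lab cl v

-- invariant tying A's components dict to componentLabel: keys are exactly the roots,
-- and the member set of c holds exactly the elements labelled c
def InvCS (S : List Int) (cl : PySem.Dict Int Int) (cs : PySem.Dict Int (List Int)) : Prop :=
  (∀ c, cs.contains c = true ↔ (c ∈ S ∧ lab cl c = c)) ∧
  (∀ c v, v ∈ cs.getD c [] ↔ (v ∈ S ∧ lab cl v = c))

-- invariant tying B's parent dict to A's labels: every key's parent is a smaller key with
-- the same label, fixed points are exactly the roots, and the size never changes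
def InvP (S : List Int) (cl : PySem.Dict Int Int) (par : PySem.Dict Int Int) : Prop :=
  (∀ v ∈ S, par.contains v = true) ∧
  (∀ v ∈ S, par.getD v v ∈ S ∧ par.getD v v ≤ v ∧
    lab cl (par.getD v v) = lab cl v ∧ (par.getD v v = v ↔ lab cl v = v)) ∧
  par.size = S.length

-- generic dict facts not in the PySem book (erase has no lookup lemmas there)
theorem find?_filter_ne {ν : Type} (w c : Int) (h : ¬ c = w) : ∀ (l : List (Int × ν)),
    (l.filter (fun p => !(p.1 == w))).find? (fun p => p.1 == c) = l.find? (fun p => p.1 == c)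
  | [] => rfl
  | p :: t => by
    by_cases hpw : p.1 = w
    · have hpc : ¬ p.1 = c := by rw [hpw]; intro hh; exact h hh.symm
      simp [List.find?_cons, hpw, find?_filter_ne w c h t]
      rw [show (w == c) = false by simp; omega]
    · by_cases hpc : p.1 = c <;>
        simp [List.filter_cons, hpw, hpc, find?_filter_ne w c h t, h]

theorem find?_filter_self {ν : Type} (w : Int) (l : List (Int × ν)) :
    (l.filter (fun p => !(p.1 == w))).find? (fun p => p.1 == w) = none := by
  rw [List.find?_eq_none]
  intro p hp
  simp [List.mem_filter] at hp
  simp [hp.2]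

theorem get?_erase {ν : Type} (d : PySem.Dict Int ν) (w c : Int) :
    (d.erase w).get? c = if c = w then none else d.get? c := by
  cases d with
  | mk l =>
    show Option.map _ (List.find? _ (List.filter _ l)) = _
    split
    · next h => subst h; rw [find?_filter_self]; rfl
    · next h => rw [find?_filter_ne w c h]; rfl

theorem getD_erase {ν : Type} (d : PySem.Dict Int ν) (w c : Int) (x : ν) :
    (d.erase w).getD c x = if c = w then x else d.getD c x := by
  simp [PySem.Dict.getD, get?_erase]; split <;> simp

theorem contains_erase {ν : Type} (d : PySem.Dict Int ν) (w c : Int) :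
    (d.erase w).contains c = if c = w then false else d.contains c := by
  rw [PySem.Dict.contains_eq_isSome_get?, PySem.Dict.contains_eq_isSome_get?, get?_erase]
  split <;> simp

theorem zip_self (L : List Int) : L.zip L = L.map (fun v => (v, v)) := by
  induction L with
  | nil => rfl
  | cons x t ih => simp [List.zip, ih]

theorem zip_map_const {β : Type} (c : β) :
    ∀ (L : List Int) (M : List Int), L.length ≤ M.length →
      L.zip (M.map (fun _ => c)) = L.map (fun v => (v, c))
  | [], _, _ => by simp
  | x :: t, [], h => by simp at h
  | x :: t, y :: u, h => by
    simp only [List.map, List.zip_cons_cons, List.length_cons] at *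
    rw [zip_map_const c t u (by omega)]

-- lookups in a dict built by updating with (v, f v) pairs
theorem getD_update_diag (L : List Int) : ∀ (d : PySem.Dict Int Int) (v d0 : Int),
    (d.update (L.map (fun x => (x, x)))).getD v d0 = if v ∈ L then v else d.getD v d0 := by
  induction L with
  | nil => simp [PySem.Dict.update]
  | cons x t ih =>
    intro d v d0
    show ((d.insert x x).update (t.map (fun x => (x, x)))).getD v d0 = _
    rw [ih]
    by_cases hv : v ∈ t <;> by_cases hx : v = x <;>
      simp [hv, hx, PySem.Dict.getD_insert]

theorem getD_update_nil {β : Type} (L : List Int) : ∀ (d : PySem.Dict Int (List β)) (v : Int),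
    (∀ u, d.getD u [] = []) →
    (d.update (L.map (fun x => (x, ([] : List β))))).getD v [] = [] := by
  induction L with
  | nil => intro d v h; exact h v
  | cons x t ih =>
    intro d v h
    show ((d.insert x []).update (t.map (fun x => (x, ([] : List β))))).getD v [] = []
    refine ih _ _ (fun u => ?_)
    rw [PySem.Dict.getD_insert]
    split
    · rfl
    · exact h u

theorem contains_update_pairs {β : Type} (f : Int → β)
    (L : List Int) : ∀ (d : PySem.Dict Int β) (c : Int),
    (d.update (L.map (fun x => (x, f x)))).contains c = (decide (c ∈ L) || d.contains c) := by
  induction L with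
  | nil => simp [PySem.Dict.update]
  | cons x t ih =>
    intro d c
    show ((d.insert x (f x)).update (t.map (fun x => (x, f x)))).contains c = _
    rw [ih]
    by_cases hv : c ∈ t <;> by_cases hx : c = x <;>
      simp [hv, hx, PySem.Dict.contains_insert]

-- A's relabel loop: a fold of inserts of the constant z
theorem getD_foldl_ins (L : List Int) : ∀ (z : Int) (d : PySem.Dict Int Int) (v : Int),
    (L.foldl (fun d i => d.insert i z) d).getD v 0 = if v ∈ L then z else d.getD v 0 := by
  induction L with
  | nil => simp
  | cons x t ih =>
    intro z d v
    simp only [List.foldl_cons, ih]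
    by_cases hv : v ∈ t <;> by_cases hx : v = x <;>
      simp [hv, hx, PySem.Dict.getD_insert]

-- A's pooling loop: a fold of adds into the member set of the fixed key z
theorem getD_foldl_mod (L : List Int) : ∀ (z c : Int) (d : PySem.Dict Int (List Int)),
    (L.foldl (fun d i => d.modify z [] (fun t => PySem.Set.add t i)) d).getD c []
      = if c = z then PySem.Set.update (d.getD z []) L else d.getD c [] := by
  induction L with
  | nil => intro z c d; simp [PySem.Set.update]; intro h; rw [h]
  | cons x t ih =>
    intro z c d
    simp only [List.foldl_cons, ih, PySem.Dict.getD_modify, PySem.Set.update_cons]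
    by_cases hc : c = z <;> simp [hc]

theorem contains_foldl_mod (L : List Int) : ∀ (z c : Int) (d : PySem.Dict Int (List Int)),
    d.contains z = true →
    (L.foldl (fun d i => d.modify z [] (fun t => PySem.Set.add t i)) d).contains c
      = d.contains c := by
  induction L with
  | nil => intro z c d _; rfl
  | cons x t ih =>
    intro z c d hz
    simp only [List.foldl_cons]
    rw [ih _ _ _ (by simp [PySem.Dict.contains_modify])]
    rw [PySem.Dict.contains_modify]
    by_cases hc : c = z <;> simp [hc, hz]

-- the cs-setup loop of A
theorem mem_getD_foldl_selfadd (L : List Int) : ∀ (d : PySem.Dict Int (List Int)) (c v : Int),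
    (v ∈ (L.foldl (fun d i => d.modify i [] (fun t => PySem.Set.add t i)) d).getD c [])
      ↔ (v ∈ d.getD c [] ∨ (v = c ∧ c ∈ L)) := by
  induction L with
  | nil => simp
  | cons x t ih =>
    intro d c v
    simp only [List.foldl_cons, ih, PySem.Dict.getD_modify, List.mem_cons]
    by_cases hc : c = x <;> simp [hc, PySem.Set.mem_add] <;> tauto

theorem contains_foldl_selfadd (L : List Int) : ∀ (d : PySem.Dict Int (List Int)) (c : Int),
    (L.foldl (fun d i => d.modify i [] (fun t => PySem.Set.add t i)) d).contains c
      = (decide (c ∈ L) || d.contains c) := by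
  induction L with
  | nil => simp
  | cons x t ih =>
    intro d c
    simp only [List.foldl_cons, ih, PySem.Dict.contains_modify, List.mem_cons]
    by_cases hc : c = x
    · simp [hc]
    · have hb : (c == x) = false := by simp [hc]
      simp [hc, hb]

-- B's find walks to the label, by induction on fuel with the measure |{u ∈ S | u ≤ v}|
theorem findB_eq (S : List Int) (cl par : PySem.Dict Int Int) (hp : InvP S cl par) :
    ∀ (fuel : Nat) (v : Int), v ∈ S →
      (S.filter (fun u => decide (u ≤ v))).length ≤ fuel → findB par fuel v = lab cl v := by
  intro fuel
  induction fuel with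
  | zero =>
    intro v hv hlen
    exfalso
    have : v ∈ S.filter (fun u => decide (u ≤ v)) := by
      simp [List.mem_filter, hv]
    have := List.length_pos_of_mem this
    omega
  | succ n ih =>
    intro v hv hlen
    obtain ⟨h1, h2, h3⟩ := hp
    obtain ⟨hpS, hple, hlabeq, hiff⟩ := h2 v hv
    show (if par.getD v v = v then v else findB par n (par.getD v v)) = lab cl v
    by_cases hfix : par.getD v v = v
    · rw [if_pos hfix]; exact (hiff.mp hfix).symm
    · rw [if_neg hfix, ih (par.getD v v) hpS, hlabeq]
      have hlt : par.getD v v < v := lt_of_le_of_ne hple hfix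
      have hsub : (S.filter (fun u => decide (u ≤ par.getD v v))).length
          < (S.filter (fun u => decide (u ≤ v))).length := by
        have : S.filter (fun u => decide (u ≤ par.getD v v))
            = (S.filter (fun u => decide (u ≤ v))).filter (fun u => decide (u ≤ par.getD v v)) := by
          rw [List.filter_filter]
          apply List.filter_congr
          intro u _
          by_cases hu : u ≤ par.getD v v <;> simp [hu] <;> omega
        rw [this]
        rw [List.length_filter_lt_length_iff_exists]
        refine ⟨v, by simp [List.mem_filter, hv], by simp; omega⟩
      omega

theorem findB_root (S : List Int) (cl par : PySem.Dict Int Int) (hp : InvP S cl par)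
    (v : Int) (hv : v ∈ S) : findB par par.size v = lab cl v := by
  refine findB_eq S cl par hp par.size v hv ?_
  have := List.length_filter_le (fun u => decide (u ≤ v)) S
  have h3 := hp.2.2
  omega

-- one unfolding of mergeA: split the two pair-folds into their components
theorem mergeA_eq (cl : PySem.Dict Int Int) (cs : PySem.Dict Int (List Int)) (x y : Int) :
    mergeA cl cs x y =
      (((((cs.getD (cl.getD x 0) []).foldl
            (fun d i => d.modify (min (cl.getD x 0) (cl.getD y 0)) []
              (fun t => PySem.Set.add t i)) cs).getD (cl.getD y 0) []).foldl
          (fun d i => d.insert i (min (cl.getD x 0) (cl.getD y 0)))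
          ((cs.getD (cl.getD x 0) []).foldl
            (fun d i => d.insert i (min (cl.getD x 0) (cl.getD y 0))) cl)),
       ((((cs.getD (cl.getD x 0) []).foldl
            (fun d i => d.modify (min (cl.getD x 0) (cl.getD y 0)) []
              (fun t => PySem.Set.add t i)) cs).getD (cl.getD y 0) []).foldl
          (fun d i => d.modify (min (cl.getD x 0) (cl.getD y 0)) []
            (fun t => PySem.Set.add t i))
          ((cs.getD (cl.getD x 0) []).foldl
            (fun d i => d.modify (min (cl.getD x 0) (cl.getD y 0)) []
              (fun t => PySem.Set.add t i)) cs)).erase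
         (cl.getD x 0 + cl.getD y 0 - min (cl.getD x 0) (cl.getD y 0))) := by
  simp only [mergeA]
  rw [PySem.List.foldl_prod_mk
    (fun (d : PySem.Dict Int Int) (i : Int) => d.insert i (min (cl.getD x 0) (cl.getD y 0)))
    (fun (d : PySem.Dict Int (List Int)) (i : Int) =>
      d.modify (min (cl.getD x 0) (cl.getD y 0)) [] (fun t => PySem.Set.add t i))]
  rw [PySem.List.foldl_prod_mk
    (fun (d : PySem.Dict Int Int) (i : Int) => d.insert i (min (cl.getD x 0) (cl.getD y 0)))
    (fun (d : PySem.Dict Int (List Int)) (i : Int) =>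
      d.modify (min (cl.getD x 0) (cl.getD y 0)) [] (fun t => PySem.Set.add t i))]

-- full characterisation of one merge: the new labels, member sets and key set
theorem mergeA_parts (S : List Int) (cl : PySem.Dict Int Int) (cs : PySem.Dict Int (List Int))
    (hcl : InvCL S cl) (hcs : InvCS S cl cs) (x y : Int) (hx : x ∈ S) (hy : y ∈ S)
    (_hne : lab cl x ≠ lab cl y) :
    (∀ v, lab (mergeA cl cs x y).1 v =
      if v ∈ S ∧ (lab cl v = lab cl x ∨ lab cl v = lab cl y)
      then min (lab cl x) (lab cl y) else lab cl v) ∧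
    (∀ c v, v ∈ (mergeA cl cs x y).2.getD c [] ↔
      (¬ c = lab cl x + lab cl y - min (lab cl x) (lab cl y)) ∧
      (if c = min (lab cl x) (lab cl y)
       then v ∈ S ∧ (lab cl v = lab cl x ∨ lab cl v = lab cl y)
       else v ∈ cs.getD c [])) ∧
    (∀ c, (mergeA cl cs x y).2.contains c =
      if c = lab cl x + lab cl y - min (lab cl x) (lab cl y) then false else cs.contains c) := by
  obtain ⟨hk, hm⟩ := hcs
  obtain ⟨hlxS, _, hlxr⟩ := hcl x hx
  obtain ⟨hlyS, _, hlyr⟩ := hcl y hy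
  have hzS : min (lab cl x) (lab cl y) ∈ S := by
    rcases min_choice (lab cl x) (lab cl y) with h | h <;> rw [h] <;> assumption
  have hzr : lab cl (min (lab cl x) (lab cl y)) = min (lab cl x) (lab cl y) := by
    rcases min_choice (lab cl x) (lab cl y) with h | h <;> rw [h] <;> assumption
  have hcz : cs.contains (min (lab cl x) (lab cl y)) = true := (hk _).mpr ⟨hzS, hzr⟩
  have hL1 : ∀ v, v ∈ cs.getD (cl.getD x 0) [] ↔ (v ∈ S ∧ lab cl v = lab cl x) :=
    fun v => hm _ v
  -- the second member list read after the first pooling loop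
  have hL2sub : ∀ v, v ∈ (((cs.getD (cl.getD x 0) []).foldl
      (fun d i => d.modify (min (cl.getD x 0) (cl.getD y 0)) []
        (fun t => PySem.Set.add t i)) cs).getD (cl.getD y 0) []) →
      (v ∈ S ∧ (lab cl v = lab cl x ∨ lab cl v = lab cl y)) := by
    intro v h
    rw [getD_foldl_mod] at h
    by_cases hzy : (cl.getD y 0 : Int) = min (cl.getD x 0) (cl.getD y 0)
    · rw [if_pos hzy, PySem.Set.mem_update, ← hzy] at h
      rcases h with h | h
      · exact ⟨((hm _ v).mp h).1, Or.inr ((hm _ v).mp h).2⟩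
      · exact ⟨((hm _ v).mp h).1, Or.inl ((hm _ v).mp h).2⟩
    · rw [if_neg hzy] at h
      exact ⟨((hm _ v).mp h).1, Or.inr ((hm _ v).mp h).2⟩
  have hL2sup : ∀ v, v ∈ S → lab cl v = lab cl y → v ∈ (((cs.getD (cl.getD x 0) []).foldl
      (fun d i => d.modify (min (cl.getD x 0) (cl.getD y 0)) []
        (fun t => PySem.Set.add t i)) cs).getD (cl.getD y 0) []) := by
    intro v hvS hvl
    rw [getD_foldl_mod]
    by_cases hzy : (cl.getD y 0 : Int) = min (cl.getD x 0) (cl.getD y 0)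
    · rw [if_pos hzy, PySem.Set.mem_update, ← hzy]
      exact Or.inl ((hm _ v).mpr ⟨hvS, hvl⟩)
    · rw [if_neg hzy]
      exact (hm _ v).mpr ⟨hvS, hvl⟩
  simp only [lab] at *
  refine ⟨?_, ?_, ?_⟩
  · -- labels
    intro v
    rw [mergeA_eq]
    show (_ : PySem.Dict Int Int).getD v 0 = _
    rw [getD_foldl_ins, getD_foldl_ins]
    by_cases h2 : v ∈ (((cs.getD (cl.getD x 0) []).foldl
        (fun d i => d.modify (min (cl.getD x 0) (cl.getD y 0)) []
          (fun t => PySem.Set.add t i)) cs).getD (cl.getD y 0) [])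
    · rw [if_pos h2, if_pos (hL2sub v h2)]
    · rw [if_neg h2]
      by_cases h1 : v ∈ cs.getD (cl.getD x 0) []
      · rw [if_pos h1, if_pos ⟨((hL1 v).mp h1).1, Or.inl ((hL1 v).mp h1).2⟩]
      · rw [if_neg h1]
        by_cases hcond : v ∈ S ∧ (cl.getD v 0 = cl.getD x 0 ∨ cl.getD v 0 = cl.getD y 0)
        · exfalso
          rcases hcond.2 with h | h
          · exact h1 ((hL1 v).mpr ⟨hcond.1, h⟩)
          · exact h2 (hL2sup v hcond.1 h)
        · rw [if_neg hcond]
  · -- member lists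
    intro c v
    rw [mergeA_eq]
    show v ∈ PySem.Dict.getD (PySem.Dict.erase _ _) c [] ↔ _
    rw [getD_erase]
    by_cases hw : c = cl.getD x 0 + cl.getD y 0 - min (cl.getD x 0) (cl.getD y 0)
    · rw [if_pos hw]; simp [hw]
    · rw [if_neg hw]
      simp only [hw, not_false_eq_true, true_and]
      rw [getD_foldl_mod]
      by_cases hcz' : c = min (cl.getD x 0) (cl.getD y 0)
      · subst hcz'
        simp only [if_true]
        rw [getD_foldl_mod]
        simp only [if_true]
        rw [PySem.Set.mem_update, PySem.Set.mem_update]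
        constructor
        · rintro ((h | h) | h)
          · have := (hm _ v).mp h
            rcases min_choice (cl.getD x 0) (cl.getD y 0) with hmin | hmin <;>
              rw [hmin] at this <;>
              exact ⟨this.1, by tauto⟩
          · exact ⟨((hL1 v).mp h).1, Or.inl ((hL1 v).mp h).2⟩
          · exact hL2sub v h
        · rintro ⟨hvS, h | h⟩
          · exact Or.inl (Or.inr ((hL1 v).mpr ⟨hvS, h⟩))
          · exact Or.inr (hL2sup v hvS h)
      · rw [if_neg hcz', getD_foldl_mod, if_neg hcz']
        simp [hcz']
  · -- key set
    intro c
    rw [mergeA_eq]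
    show PySem.Dict.contains (PySem.Dict.erase _ _) c = _
    rw [contains_erase]
    rw [contains_foldl_mod _ _ _ _ (by rw [contains_foldl_mod _ _ _ _ hcz]; exact hcz)]
    rw [contains_foldl_mod _ _ _ _ hcz]
    rfl

-- what merge does to the labels
theorem mergeA_lab (S : List Int) (cl : PySem.Dict Int Int) (cs : PySem.Dict Int (List Int))
    (hcl : InvCL S cl) (hcs : InvCS S cl cs) (x y : Int) (hx : x ∈ S) (hy : y ∈ S)
    (hne : lab cl x ≠ lab cl y) :
    ∀ v ∈ S, lab (mergeA cl cs x y).1 v =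
      (if lab cl v = lab cl x ∨ lab cl v = lab cl y then min (lab cl x) (lab cl y)
       else lab cl v) := by
  intro v hv
  rw [(mergeA_parts S cl cs hcl hcs x y hx hy hne).1 v]
  by_cases h : lab cl v = lab cl x ∨ lab cl v = lab cl y <;> simp [h, hv]

-- merge preserves the A-side invariants
theorem mergeA_inv (S : List Int) (cl : PySem.Dict Int Int) (cs : PySem.Dict Int (List Int))
    (hcl : InvCL S cl) (hcs : InvCS S cl cs) (x y : Int) (hx : x ∈ S) (hy : y ∈ S)
    (hne : lab cl x ≠ lab cl y) :
    InvCL S (mergeA cl cs x y).1 ∧ InvCS S (mergeA cl cs x y).1 (mergeA cl cs x y).2 := by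
  obtain ⟨h1, h2, h3⟩ := mergeA_parts S cl cs hcl hcs x y hx hy hne
  obtain ⟨hlxS, hlxle, hlxr⟩ := hcl x hx
  obtain ⟨hlyS, hlyle, hlyr⟩ := hcl y hy
  have hzS : min (lab cl x) (lab cl y) ∈ S := by
    rcases min_choice (lab cl x) (lab cl y) with h | h <;> rw [h] <;> assumption
  have hzr : lab cl (min (lab cl x) (lab cl y)) = min (lab cl x) (lab cl y) := by
    rcases min_choice (lab cl x) (lab cl y) with h | h <;> rw [h] <;> assumption
  have hzw : min (lab cl x) (lab cl y)
      ≠ lab cl x + lab cl y - min (lab cl x) (lab cl y) := by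
    rcases min_choice (lab cl x) (lab cl y) with h | h <;> rw [h] <;> omega
  have hwS : lab cl x + lab cl y - min (lab cl x) (lab cl y) ∈ S := by
    rcases min_choice (lab cl x) (lab cl y) with h | h <;> rw [h]
    · rw [(by omega : lab cl x + lab cl y - lab cl x = lab cl y)]; exact hlyS
    · rw [(by omega : lab cl x + lab cl y - lab cl y = lab cl x)]; exact hlxS
  have hwr : lab cl (lab cl x + lab cl y - min (lab cl x) (lab cl y))
      = lab cl x + lab cl y - min (lab cl x) (lab cl y) := by
    rcases min_choice (lab cl x) (lab cl y) with h | h <;> rw [h]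
    · rw [(by omega : lab cl x + lab cl y - lab cl x = lab cl y)]; exact hlyr
    · rw [(by omega : lab cl x + lab cl y - lab cl y = lab cl x)]; exact hlxr
  constructor
  · -- InvCL
    intro v hv
    rw [h1 v]
    by_cases hcond : lab cl v = lab cl x ∨ lab cl v = lab cl y
    · simp only [hv, hcond, and_self, if_pos]
      refine ⟨hzS, ?_, ?_⟩
      · have := (hcl v hv).2.1
        rcases hcond with h | h <;> omega
      · rw [h1 (min (lab cl x) (lab cl y))]
        have : lab cl (min (lab cl x) (lab cl y)) = lab cl x
            ∨ lab cl (min (lab cl x) (lab cl y)) = lab cl y := by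
          rcases min_choice (lab cl x) (lab cl y) with h | h <;> rw [h] <;> simp [hlxr, hlyr]
        simp [hzS, this]
    · have hcond' : ¬ (v ∈ S ∧ (lab cl v = lab cl x ∨ lab cl v = lab cl y)) := by tauto
      rw [if_neg hcond']
      obtain ⟨hS', hle', hr'⟩ := hcl v hv
      refine ⟨hS', hle', ?_⟩
      rw [h1 (lab cl v)]
      have : ¬ (lab cl v ∈ S ∧ (lab cl (lab cl v) = lab cl x ∨ lab cl (lab cl v) = lab cl y)) := by
        rw [hr']; tauto
      rw [if_neg this, hr']
  · constructor
    · -- keys of components = roots of the new labels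
      intro c
      rw [h3 c]
      by_cases hw : c = lab cl x + lab cl y - min (lab cl x) (lab cl y)
      · subst hw
        constructor
        · intro h; simp at h
        · rintro ⟨hcS, hroot⟩
          rw [h1 _] at hroot
          rw [if_pos ⟨hwS, by rw [hwr]; rcases min_choice (lab cl x) (lab cl y) with h | h <;>
            rw [h] <;> [right; left] <;> omega⟩] at hroot
          exact (hzw hroot).elim
      · rw [if_neg hw]
        rw [(hcs.1 c)]
        constructor
        · rintro ⟨hcS, hroot⟩
          refine ⟨hcS, ?_⟩
          rw [h1 c]
          by_cases hcond : c ∈ S ∧ (lab cl c = lab cl x ∨ lab cl c = lab cl y)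
          · rw [if_pos hcond]
            -- c is a root in {lx, ly} and c ≠ w, hence c = z
            rcases hcond.2 with h | h <;> rw [hroot] at h <;> subst h <;>
              rcases min_choice (lab cl x) (lab cl y) with h' | h' <;> omega
          · rw [if_neg hcond]; exact hroot
        · rintro ⟨hcS, hroot⟩
          refine ⟨hcS, ?_⟩
          rw [h1 c] at hroot
          by_cases hcond : c ∈ S ∧ (lab cl c = lab cl x ∨ lab cl c = lab cl y)
          · rw [if_pos hcond] at hroot
            rw [← hroot]; exact hzr
          · rwa [if_neg hcond] at hroot
    · -- member sets of the new labels
      intro c v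
      rw [h2 c v]
      by_cases hw : c = lab cl x + lab cl y - min (lab cl x) (lab cl y)
      · simp only [hw, not_true_eq_false, false_and, false_iff]
        rintro ⟨hvS, hroot⟩
        rw [h1 v] at hroot
        by_cases hcond : v ∈ S ∧ (lab cl v = lab cl x ∨ lab cl v = lab cl y)
        · rw [if_pos hcond] at hroot; exact hzw hroot
        · rw [if_neg hcond] at hroot
          exact hcond ⟨hvS, by rw [hroot]; rcases min_choice (lab cl x) (lab cl y) with h | h <;>
            rw [h] <;> [right; left] <;> omega⟩
      · simp only [hw, not_false_eq_true, true_and]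
        by_cases hcz : c = min (lab cl x) (lab cl y)
        · rw [if_pos hcz]
          constructor
          · rintro ⟨hvS, hcond⟩
            refine ⟨hvS, ?_⟩
            rw [h1 v, if_pos ⟨hvS, hcond⟩, hcz]
          · rintro ⟨hvS, hroot⟩
            refine ⟨hvS, ?_⟩
            rw [h1 v] at hroot
            by_cases hcond : v ∈ S ∧ (lab cl v = lab cl x ∨ lab cl v = lab cl y)
            · exact hcond.2
            · rw [if_neg hcond] at hroot
              exact absurd ⟨hvS, by rw [hroot, hcz]; rcases min_choice (lab cl x) (lab cl y)
                with h | h <;> rw [h] <;> [left; right] <;> rfl⟩ hcond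
        · rw [if_neg hcz, hcs.2 c v]
          constructor
          · rintro ⟨hvS, hl⟩
            refine ⟨hvS, ?_⟩
            rw [h1 v]
            have : ¬ (v ∈ S ∧ (lab cl v = lab cl x ∨ lab cl v = lab cl y)) := by
              rintro ⟨-, h | h⟩ <;> rw [hl] at h <;> subst h <;>
                rcases min_choice (lab cl x) (lab cl y) with h' | h' <;> omega
            rw [if_neg this]; exact hl
          · rintro ⟨hvS, hroot⟩
            refine ⟨hvS, ?_⟩
            rw [h1 v] at hroot
            by_cases hcond : v ∈ S ∧ (lab cl v = lab cl x ∨ lab cl v = lab cl y)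
            · rw [if_pos hcond] at hroot; exact absurd hroot.symm hcz
            · rwa [if_neg hcond] at hroot

-- B's single pointer write preserves the parent invariant w.r.t. the merged labels
theorem unionB_inv (S : List Int) (cl cl' par : PySem.Dict Int Int)
    (hcl : InvCL S cl) (hp : InvP S cl par) (x y : Int) (hx : x ∈ S) (hy : y ∈ S)
    (hne : lab cl x ≠ lab cl y)
    (hg : ∀ v ∈ S, lab cl' v =
      (if lab cl v = lab cl x ∨ lab cl v = lab cl y then min (lab cl x) (lab cl y)
       else lab cl v)) :
    InvP S cl'
      (if lab cl x < lab cl y then par.insert (lab cl y) (lab cl x)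
       else par.insert (lab cl x) (lab cl y)) := by
  obtain ⟨hc, hptr, hsz⟩ := hp
  obtain ⟨hlxS, hlxle, hlxr⟩ := hcl x hx
  obtain ⟨hlyS, hlyle, hlyr⟩ := hcl y hy
  -- name the written key (the larger root) and value (the smaller root)
  set w := if lab cl x < lab cl y then lab cl y else lab cl x with hwdef
  set z := if lab cl x < lab cl y then lab cl x else lab cl y with hzdef
  have hpar' : (if lab cl x < lab cl y then par.insert (lab cl y) (lab cl x)
      else par.insert (lab cl x) (lab cl y)) = par.insert w z := by
    by_cases h : lab cl x < lab cl y <;> simp [hwdef, hzdef, h]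
  rw [hpar']
  have hzmin : z = min (lab cl x) (lab cl y) := by
    by_cases h : lab cl x < lab cl y <;> simp [hzdef, h] <;> omega
  have hwS : w ∈ S := by by_cases h : lab cl x < lab cl y <;> simp [hwdef, h] <;> assumption
  have hzS : z ∈ S := by by_cases h : lab cl x < lab cl y <;> simp [hzdef, h] <;> assumption
  have hzw : z < w := by
    by_cases h : lab cl x < lab cl y <;> simp [hzdef, hwdef, h] <;> omega
  have hwr : lab cl w = w := by
    by_cases h : lab cl x < lab cl y <;> simp [hwdef, h] <;> assumption
  have hzr : lab cl z = z := by
    by_cases h : lab cl x < lab cl y <;> simp [hzdef, h] <;> assumption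
  have hwl : lab cl w = lab cl x ∨ lab cl w = lab cl y := by
    by_cases h : lab cl x < lab cl y <;> simp [hwdef, h, hlxr, hlyr]
  have hzl : lab cl z = lab cl x ∨ lab cl z = lab cl y := by
    by_cases h : lab cl x < lab cl y <;> simp [hzdef, h, hlxr, hlyr]
  have hlabz : lab cl' z = z := by
    rw [hg z hzS, if_pos hzl, hzmin]
  have hlabw : lab cl' w = z := by
    rw [hg w hwS, if_pos hwl, hzmin]
  refine ⟨?_, ?_, ?_⟩
  · intro v hv
    rw [PySem.Dict.contains_insert]
    simp [hc v hv]
  · intro v hv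
    rw [PySem.Dict.getD_insert]
    by_cases hvw : v = w
    · rw [if_pos hvw, hvw]
      refine ⟨hzS, le_of_lt hzw, by rw [hlabz, hlabw], ?_⟩
      constructor
      · intro h; omega
      · intro h; rw [hlabw] at h; omega
    · rw [if_neg hvw]
      obtain ⟨hpS, hple, hplab, hpiff⟩ := hptr v hv
      refine ⟨hpS, hple, ?_, ?_⟩
      · rw [hg _ hpS, hg _ hv, hplab]
      · constructor
        · intro h
          have hroot := hpiff.mp h
          rw [hg v hv]
          by_cases hcond : lab cl v = lab cl x ∨ lab cl v = lab cl y
          · rw [if_pos hcond, ← hzmin]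
            -- v is a root in {lab x, lab y} other than w, hence v = z
            rcases hcond with hh | hh <;> rw [hroot] at hh <;>
              by_cases hlt : lab cl x < lab cl y <;> simp [hwdef, hlt] at hvw <;> omega
          · rw [if_neg hcond]; exact hroot
        · intro h
          rw [hg v hv] at h
          by_cases hcond : lab cl v = lab cl x ∨ lab cl v = lab cl y
          · rw [if_pos hcond, ← hzmin] at h
            -- lab v ∈ {lab x, lab y} and the new label z equals v, so v = z is an old root
            rw [h] at hzr
            exact hpiff.mpr hzr
          · rw [if_neg hcond] at h
            exact hpiff.mpr h
  · rw [PySem.Dict.size_insert, if_pos (hc w hwS)]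
    exact hsz

-- one merge step on the connectivity characterisation of A's labels
theorem connInv_step (S : List Int) (cl : PySem.Dict Int Int) (cs : PySem.Dict Int (List Int))
    (hcl : InvCL S cl) (hcs : InvCS S cl cs) (x y : Int) (hx : x ∈ S) (hy : y ∈ S)
    (hne : lab cl x ≠ lab cl y) (ps : List (Int × Int))
    (hconn : ∀ u ∈ S, ∀ v ∈ S, (lab cl u = lab cl v ↔ connRev ps u v = true)) :
    ∀ u ∈ S, ∀ v ∈ S,
      (lab (mergeA cl cs x y).1 u = lab (mergeA cl cs x y).1 v
        ↔ connRev ((x, y) :: ps) u v = true) := by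
  intro u hu v hv
  have hg := mergeA_lab S cl cs hcl hcs x y hx hy hne
  rw [hg u hu, hg v hv]
  simp only [connRev, Bool.or_eq_true, Bool.and_eq_true]
  rw [← hconn u hu v hv, ← hconn u hu x hx, ← hconn u hu y hy,
    ← hconn y hy v hv, ← hconn x hx v hv]
  rcases min_choice (lab cl x) (lab cl y) with hm | hm <;>
    split_ifs with h1 h2 h2 <;> omega

-- reading an in-range index of state lands in set(state)
theorem gS_mem (state : List Int) (i : Nat) (h : i < state.length) :
    PySem.List.pyGetD state (i : Int) 0 ∈ PySem.Set.ofList state := by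
  have h0 : (0 : Int) ≤ (i : Int) := by exact_mod_cast Nat.zero_le i
  have hI : (i : Int) < (state.length : Int) := by exact_mod_cast h
  rw [PySem.List.pyGetD_eq_getElem state 0 h0 hI, PySem.Set.mem_ofList]
  exact List.getElem_mem _

-- the two loops agree from edge e on, given the invariants, the connectivity
-- characterisation of the labels, and Pre_'s tail guarantee (all remaining edges
-- complete, or some reachable edge's check fires first)
theorem loop_eq (state : List Int) (crossing : List Bool) :
    ∀ (f e : Nat), e + f = 5 →
    ∀ (cl : PySem.Dict Int Int) (cs : PySem.Dict Int (List Int))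
      (par : PySem.Dict Int Int) (curr : Int),
      ((∀ j, e ≤ j → j < 5 → completesAt state crossing j = true) ∨
       (∃ j, e ≤ j ∧ j < 5 ∧ (∀ i, e ≤ i → i < j → completesAt state crossing i = true) ∧
         falseAt state crossing j = true)) →
      curr = curAt state crossing e →
      curr ∈ PySem.Set.ofList state →
      InvCL (PySem.Set.ofList state) cl →
      InvCS (PySem.Set.ofList state) cl cs →
      InvP (PySem.Set.ofList state) cl par →
      (∀ u ∈ PySem.Set.ofList state, ∀ v ∈ PySem.Set.ofList state,
        (lab cl u = lab cl v ↔ connRev (pairsRev state crossing e) u v = true)) →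
      loopA state crossing (PySem.List.pyRange (e : Int) 5) cl cs curr
        = loopB state crossing (PySem.List.pyRange (e : Int) 5) par curr := by
  intro f
  induction f with
  | zero =>
    intro e he cl cs par curr _ _ _ _ _ _ _
    have he5 : e = 5 := by omega
    subst he5
    rw [PySem.List.pyRange_one_eq_nil (by norm_num)]
    rfl
  | succ f ih =>
    intro e he cl cs par curr hrun hcur hcurS hcl hcs hp hconn
    have he5 : e < 5 := by omega
    have hcons : PySem.List.pyRange (e : Int) 5 = (e : Int) :: PySem.List.pyRange ((e : Int) + 1) 5 :=
      PySem.List.pyRange_one_cons (by exact_mod_cast he5)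
    have hcast1 : ((e : Int) + 1) = (((e + 1 : Nat)) : Int) := by push_cast; ring
    -- split the run hypothesis at edge e
    have hsplit : (completesAt state crossing e = true ∧
        ((∀ j, e + 1 ≤ j → j < 5 → completesAt state crossing j = true) ∨
         (∃ j, e + 1 ≤ j ∧ j < 5 ∧ (∀ i, e + 1 ≤ i → i < j → completesAt state crossing i = true) ∧
           falseAt state crossing j = true))) ∨ falseAt state crossing e = true := by
      rcases hrun with hall | ⟨j, hje, hj5, hpre, hfj⟩
      · exact Or.inl ⟨hall e (le_refl e) he5, Or.inl (fun j h1 h2 => hall j (by omega) h2)⟩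
      · by_cases hej : j = e
        · subst hej; exact Or.inr hfj
        · exact Or.inl ⟨hpre e (le_refl e) (by omega),
            Or.inr ⟨j, by omega, hj5, fun i h1 h2 => hpre i (by omega) h2, hfj⟩⟩
    rw [hcons]
    by_cases hb : PySem.List.pyGetD crossing (e : Int) false = true
    · -- crossing edge: the pair is (state[2e+1], state[2e+2])
      have hpair : pairAt state crossing e =
          (PySem.List.pyGetD state (2 * (e : Int) + 1) 0,
           PySem.List.pyGetD state (2 * (e : Int) + 2) 0) := by
        simp [pairAt, hb]
      rcases hsplit with ⟨hcomp, hrun'⟩ | hfalse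
      · -- the check does not fire; both sides merge and continue
        have hok : okAt state crossing e = true := by
          simp only [completesAt, Bool.and_eq_true] at hcomp; exact hcomp.1.1
        have h22 : 2 * e + 2 < state.length := by
          simp only [okAt, hb, if_true, Bool.and_eq_true, decide_eq_true_eq] at hok
          exact hok.2
        have ha : PySem.List.pyGetD state (2 * (e : Int) + 1) 0 ∈ PySem.Set.ofList state := by
          have h := gS_mem state (2 * e + 1) (by omega)
          rwa [show ((2 * e + 1 : Nat) : Int) = 2 * (e : Int) + 1 by push_cast; ring] at h
        have hb2 : PySem.List.pyGetD state (2 * (e : Int) + 2) 0 ∈ PySem.Set.ofList state := by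
          have h := gS_mem state (2 * e + 2) (by omega)
          rwa [show ((2 * e + 2 : Nat) : Int) = 2 * (e : Int) + 2 by push_cast; ring] at h
        have hconnf : connRev (pairsRev state crossing e)
            (PySem.List.pyGetD state (2 * (e : Int) + 1) 0)
            (PySem.List.pyGetD state (2 * (e : Int) + 2) 0) = false := by
          simp only [completesAt, Bool.and_eq_true, Bool.not_eq_true'] at hcomp
          have := hcomp.1.2
          rwa [hpair] at this
        have hlabne : lab cl (PySem.List.pyGetD state (2 * (e : Int) + 1) 0)
            ≠ lab cl (PySem.List.pyGetD state (2 * (e : Int) + 2) 0) := by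
          intro h
          have := (hconn _ ha _ hb2).mp h
          rw [hconnf] at this
          cases this
        simp only [loopA, loopB, hb, if_true]
        rw [findB_root _ cl par hp _ ha, findB_root _ cl par hp _ hb2]
        simp only [lab]
        simp only [lab] at hlabne
        rw [if_neg hlabne, if_neg hlabne]
        obtain ⟨hcl', hcs'⟩ := mergeA_inv _ cl cs hcl hcs _ _ ha hb2 hlabne
        have hg := mergeA_lab _ cl cs hcl hcs _ _ ha hb2 hlabne
        have hp' := unionB_inv _ cl (mergeA cl cs _ _).1 par hcl hp _ _ ha hb2 hlabne hg
        have hconn' := connInv_step _ cl cs hcl hcs _ _ ha hb2 hlabne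
          (pairsRev state crossing e) hconn
        have hconn'' : ∀ u ∈ PySem.Set.ofList state, ∀ v ∈ PySem.Set.ofList state,
            (lab (mergeA cl cs (PySem.List.pyGetD state (2 * (e : Int) + 1) 0)
              (PySem.List.pyGetD state (2 * (e : Int) + 2) 0)).1 u
             = lab (mergeA cl cs (PySem.List.pyGetD state (2 * (e : Int) + 1) 0)
              (PySem.List.pyGetD state (2 * (e : Int) + 2) 0)).1 v
              ↔ connRev (pairsRev state crossing (e + 1)) u v = true) := by
          intro u hu v hv
          have h := hconn' u hu v hv
          simp only [pairsRev, hpair]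
          exact h
        have hcur' : curr = curAt state crossing (e + 1) := by
          simp [curAt, hb]; exact hcur
        simp only [lab] at hp' hconn''
        rw [hcast1]
        by_cases hlt : cl.getD (PySem.List.pyGetD state (2 * (e : Int) + 1) 0) 0
            < cl.getD (PySem.List.pyGetD state (2 * (e : Int) + 2) 0) 0
        · rw [if_pos hlt] at hp' ⊢
          exact ih (e + 1) (by omega) _ _ _ _ hrun' hcur' hcurS hcl' hcs' hp' hconn''
        · rw [if_neg hlt] at hp' ⊢
          exact ih (e + 1) (by omega) _ _ _ _ hrun' hcur' hcurS hcl' hcs' hp' hconn''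
      · -- the check fires: both sides return False
        have hok : okAt state crossing e = true := by
          simp only [falseAt, Bool.and_eq_true] at hfalse; exact hfalse.1
        have h22 : 2 * e + 2 < state.length := by
          simp only [okAt, hb, if_true, Bool.and_eq_true, decide_eq_true_eq] at hok
          exact hok.2
        have ha : PySem.List.pyGetD state (2 * (e : Int) + 1) 0 ∈ PySem.Set.ofList state := by
          have h := gS_mem state (2 * e + 1) (by omega)
          rwa [show ((2 * e + 1 : Nat) : Int) = 2 * (e : Int) + 1 by push_cast; ring] at h
        have hb2 : PySem.List.pyGetD state (2 * (e : Int) + 2) 0 ∈ PySem.Set.ofList state := by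
          have h := gS_mem state (2 * e + 2) (by omega)
          rwa [show ((2 * e + 2 : Nat) : Int) = 2 * (e : Int) + 2 by push_cast; ring] at h
        have hconnt : connRev (pairsRev state crossing e)
            (PySem.List.pyGetD state (2 * (e : Int) + 1) 0)
            (PySem.List.pyGetD state (2 * (e : Int) + 2) 0) = true := by
          simp only [falseAt, Bool.and_eq_true] at hfalse
          have := hfalse.2
          rwa [hpair] at this
        have hlabeq : lab cl (PySem.List.pyGetD state (2 * (e : Int) + 1) 0)
            = lab cl (PySem.List.pyGetD state (2 * (e : Int) + 2) 0) :=
          (hconn _ ha _ hb2).mpr hconnt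
        simp only [loopA, loopB, hb, if_true]
        rw [findB_root _ cl par hp _ ha, findB_root _ cl par hp _ hb2]
        simp only [lab]
        simp only [lab] at hlabeq
        rw [if_pos hlabeq, if_pos hlabeq]
    · -- non-crossing edge: the pair is (state[2e+1], currEdge)
      rw [Bool.not_eq_true] at hb
      have hpair : pairAt state crossing e =
          (PySem.List.pyGetD state (2 * (e : Int) + 1) 0, curAt state crossing e) := by
        simp [pairAt, hb]
      rcases hsplit with ⟨hcomp, hrun'⟩ | hfalse
      · have hok : okAt state crossing e = true := by
          simp only [completesAt, Bool.and_eq_true] at hcomp; exact hcomp.1.1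
        have h21 : 2 * e + 1 < state.length := by
          simp only [okAt, hb, Bool.false_eq_true, if_false, Bool.and_eq_true,
            decide_eq_true_eq] at hok
          exact hok.2
        have h22 : 2 * e + 2 < state.length := by
          simp only [completesAt, Bool.and_eq_true, decide_eq_true_eq] at hcomp
          exact hcomp.2
        have ha : PySem.List.pyGetD state (2 * (e : Int) + 1) 0 ∈ PySem.Set.ofList state := by
          have h := gS_mem state (2 * e + 1) (by omega)
          rwa [show ((2 * e + 1 : Nat) : Int) = 2 * (e : Int) + 1 by push_cast; ring] at h
        have hconnf : connRev (pairsRev state crossing e)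
            (PySem.List.pyGetD state (2 * (e : Int) + 1) 0) curr = false := by
          simp only [completesAt, Bool.and_eq_true, Bool.not_eq_true'] at hcomp
          have := hcomp.1.2
          rw [hpair] at this
          rwa [← hcur] at this
        have hlabne : lab cl (PySem.List.pyGetD state (2 * (e : Int) + 1) 0) ≠ lab cl curr := by
          intro h
          have := (hconn _ ha _ hcurS).mp h
          rw [hconnf] at this
          cases this
        simp only [loopA, loopB, hb, Bool.false_eq_true, if_false]
        rw [findB_root _ cl par hp _ ha, findB_root _ cl par hp _ hcurS]
        simp only [lab]
        simp only [lab] at hlabne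
        rw [if_neg hlabne, if_neg hlabne]
        obtain ⟨hcl', hcs'⟩ := mergeA_inv _ cl cs hcl hcs _ _ ha hcurS hlabne
        have hg := mergeA_lab _ cl cs hcl hcs _ _ ha hcurS hlabne
        have hp' := unionB_inv _ cl (mergeA cl cs _ _).1 par hcl hp _ _ ha hcurS hlabne hg
        have hconn' := connInv_step _ cl cs hcl hcs _ _ ha hcurS hlabne
          (pairsRev state crossing e) hconn
        have hconn'' : ∀ u ∈ PySem.Set.ofList state, ∀ v ∈ PySem.Set.ofList state,
            (lab (mergeA cl cs (PySem.List.pyGetD state (2 * (e : Int) + 1) 0) curr).1 u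
             = lab (mergeA cl cs (PySem.List.pyGetD state (2 * (e : Int) + 1) 0) curr).1 v
              ↔ connRev (pairsRev state crossing (e + 1)) u v = true) := by
          intro u hu v hv
          have h := hconn' u hu v hv
          simp only [pairsRev, hpair, ← hcur]
          exact h
        have hcur' : PySem.List.pyGetD state (2 * (e : Int) + 2) 0
            = curAt state crossing (e + 1) := by
          simp [curAt, hb]
        have hcurS' : PySem.List.pyGetD state (2 * (e : Int) + 2) 0 ∈ PySem.Set.ofList state := by
          have h := gS_mem state (2 * e + 2) (by omega)
          rwa [show ((2 * e + 2 : Nat) : Int) = 2 * (e : Int) + 2 by push_cast; ring] at h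
        simp only [lab] at hp' hconn''
        rw [hcast1]
        by_cases hlt : cl.getD (PySem.List.pyGetD state (2 * (e : Int) + 1) 0) 0
            < cl.getD curr 0
        · rw [if_pos hlt] at hp' ⊢
          exact ih (e + 1) (by omega) _ _ _ _ hrun' hcur' hcurS' hcl' hcs' hp' hconn''
        · rw [if_neg hlt] at hp' ⊢
          exact ih (e + 1) (by omega) _ _ _ _ hrun' hcur' hcurS' hcl' hcs' hp' hconn''
      · have hok : okAt state crossing e = true := by
          simp only [falseAt, Bool.and_eq_true] at hfalse; exact hfalse.1
        have h21 : 2 * e + 1 < state.length := by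
          simp only [okAt, hb, Bool.false_eq_true, if_false, Bool.and_eq_true,
            decide_eq_true_eq] at hok
          exact hok.2
        have ha : PySem.List.pyGetD state (2 * (e : Int) + 1) 0 ∈ PySem.Set.ofList state := by
          have h := gS_mem state (2 * e + 1) (by omega)
          rwa [show ((2 * e + 1 : Nat) : Int) = 2 * (e : Int) + 1 by push_cast; ring] at h
        have hconnt : connRev (pairsRev state crossing e)
            (PySem.List.pyGetD state (2 * (e : Int) + 1) 0) curr = true := by
          simp only [falseAt, Bool.and_eq_true] at hfalse
          have := hfalse.2
          rw [hpair] at this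
          rwa [← hcur] at this
        have hlabeq : lab cl (PySem.List.pyGetD state (2 * (e : Int) + 1) 0) = lab cl curr :=
          (hconn _ ha _ hcurS).mpr hconnt
        simp only [loopA, loopB, hb, Bool.false_eq_true, if_false]
        rw [findB_root _ cl par hp _ ha, findB_root _ cl par hp _ hcurS]
        simp only [lab]
        simp only [lab] at hlabeq
        rw [if_pos hlabeq, if_pos hlabeq]

-- the initial structures of both ports satisfy the invariants
theorem init_cl (state : List Int) :
    ∀ v ∈ PySem.Set.ofList state,
      lab (PySem.Dict.ofList ((PySem.Set.ofList state).zip (PySem.Set.ofList state))) v = v := by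
  intro v hv
  show (PySem.Dict.empty.update ((PySem.Set.ofList state).zip (PySem.Set.ofList state))).getD v 0 = v
  rw [zip_self, getD_update_diag, if_pos hv]

theorem keys_init_cs (state : List Int) :
    (PySem.Dict.ofList ((PySem.Set.ofList state).zip
      (state.map (fun _ => ([] : List Int))))).keys = PySem.Set.ofList state := by
  rw [zip_map_const _ _ _ (PySem.Set.length_ofList_le state)]
  show (List.foldl (fun d p => d.insert p.1 p.2) PySem.Dict.empty
    ((PySem.Set.ofList state).map (fun v => (v, ([] : List Int))))).keys = _
  rw [PySem.Dict.keys_foldl_insert_key ((PySem.Set.ofList state).map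
      (fun v => (v, ([] : List Int)))) Prod.fst (fun _ p => p.2) PySem.Dict.empty]
  rw [List.map_map]
  rw [show (Prod.fst ∘ fun v : Int => (v, ([] : List Int))) = id from rfl]
  rw [List.map_id]
  rw [show (PySem.Dict.empty : PySem.Dict Int (List Int)).keys = ([] : List Int) from rfl]
  rw [PySem.Set.update_nil_left, PySem.Set.ofList_ofList]

-- ===== VERDICT (by name: the statement is the Claim_ definition above) =====
theorem validStateFromCrossing_spec : Claim_equal_validStateFromCrossing := by
  intro state crossing _hdom hpre
  unfold Spec_validStateFromCrossing
  obtain ⟨hne, hrun0⟩ := hpre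
  have hn1 : 0 < state.length := List.length_pos_of_ne_nil hne
  have hnodup : (PySem.Set.ofList state).Nodup := PySem.Set.nodup_ofList state
  have hlab0 := init_cl state
  -- InvCL for the initial label dict
  have hcl0 : InvCL (PySem.Set.ofList state)
      (PySem.Dict.ofList ((PySem.Set.ofList state).zip (PySem.Set.ofList state))) := by
    intro v hv
    rw [hlab0 v hv]
    exact ⟨hv, le_refl v, hlab0 v hv⟩
  -- InvCS for the initial components dict (after the self-add setup loop)
  have hcs0getD : ∀ c, (PySem.Dict.ofList ((PySem.Set.ofList state).zip
      (state.map (fun _ => ([] : List Int))))).getD c [] = [] := by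
    intro c
    rw [zip_map_const _ _ _ (PySem.Set.length_ofList_le state)]
    exact getD_update_nil _ _ _ (fun u => rfl)
  have hcs0cont : ∀ c, (PySem.Dict.ofList ((PySem.Set.ofList state).zip
      (state.map (fun _ => ([] : List Int))))).contains c
      = (decide (c ∈ PySem.Set.ofList state) || false) := by
    intro c
    rw [zip_map_const _ _ _ (PySem.Set.length_ofList_le state)]
    exact contains_update_pairs _ _ _ _
  have hcs1 : InvCS (PySem.Set.ofList state)
      (PySem.Dict.ofList ((PySem.Set.ofList state).zip (PySem.Set.ofList state)))
      ((PySem.Dict.ofList ((PySem.Set.ofList state).zip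
          (state.map (fun _ => ([] : List Int))))).keys.foldl
        (fun d i => d.modify i [] (fun t => PySem.Set.add t i))
        (PySem.Dict.ofList ((PySem.Set.ofList state).zip
          (state.map (fun _ => ([] : List Int)))))) := by
    constructor
    · intro c
      rw [contains_foldl_selfadd, hcs0cont c, keys_init_cs]
      constructor
      · intro h
        simp only [Bool.or_false, Bool.or_self, decide_eq_true_eq] at h
        exact ⟨h, hlab0 c h⟩
      · rintro ⟨hcS, -⟩
        simp only [Bool.or_false, Bool.or_self, decide_eq_true_eq]
        exact hcS
    · intro c v
      rw [mem_getD_foldl_selfadd, hcs0getD c, keys_init_cs]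
      constructor
      · rintro (h | ⟨hvc, hcS⟩)
        · cases h
        · subst hvc; exact ⟨hcS, hlab0 v hcS⟩
      · rintro ⟨hvS, hl⟩
        rw [hlab0 v hvS] at hl
        subst hl
        exact Or.inr ⟨rfl, hvS⟩
  -- InvP for the initial parent dict
  have hpar0getD : ∀ (v d0 : Int), (PySem.Dict.ofList ((PySem.Set.ofList state).map
      (fun v => (v, v)))).getD v d0 = if v ∈ PySem.Set.ofList state then v else d0 := by
    intro v d0
    show (PySem.Dict.empty.update ((PySem.Set.ofList state).map (fun v => (v, v)))).getD v d0 = _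
    rw [getD_update_diag]
    split <;> rfl
  have hp0 : InvP (PySem.Set.ofList state)
      (PySem.Dict.ofList ((PySem.Set.ofList state).zip (PySem.Set.ofList state)))
      (PySem.Dict.ofList ((PySem.Set.ofList state).map (fun v => (v, v)))) := by
    refine ⟨?_, ?_, ?_⟩
    · intro v hv
      show (PySem.Dict.empty.update ((PySem.Set.ofList state).map (fun v => (v, v)))).contains v = true
      rw [contains_update_pairs (fun x => x)]
      simp [hv]
    · intro v hv
      rw [hpar0getD v v, if_pos hv, hlab0 v hv]
      exact ⟨hv, le_refl v, rfl, by simp⟩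
    · show (PySem.Dict.empty.update ((PySem.Set.ofList state).map (fun v => (v, v)))).size
        = (PySem.Set.ofList state).length
      have hitems := PySem.Dict.items_foldl_insert_fresh
        ((PySem.Set.ofList state).map (fun v => (v, v))) Prod.fst Prod.snd PySem.Dict.empty
        (fun a _ => rfl)
        (by rw [List.map_map]
            have : (Prod.fst ∘ fun v : Int => (v, v)) = id := rfl
            rw [this, List.map_id]; exact hnodup)
      show (List.foldl (fun d p => d.insert p.1 p.2) PySem.Dict.empty
        ((PySem.Set.ofList state).map (fun v => (v, v)))).items.length = _
      rw [hitems]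
      simp [PySem.Dict.empty]
  -- initial connectivity characterisation: labels are the identity, no pairs yet
  have hconn0 : ∀ u ∈ PySem.Set.ofList state, ∀ v ∈ PySem.Set.ofList state,
      (lab (PySem.Dict.ofList ((PySem.Set.ofList state).zip (PySem.Set.ofList state))) u
        = lab (PySem.Dict.ofList ((PySem.Set.ofList state).zip (PySem.Set.ofList state))) v
        ↔ connRev (pairsRev state crossing 0) u v = true) := by
    intro u hu v hv
    rw [hlab0 u hu, hlab0 v hv]
    simp [pairsRev, connRev]
  -- the initial currEdge
  have hcurS : PySem.List.pyGetD state 0 0 ∈ PySem.Set.ofList state := by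
    have h := gS_mem state 0 hn1
    simpa using h
  -- Pre_'s disjunction in the loop lemma's form
  have hrun : (∀ j, 0 ≤ j → j < 5 → completesAt state crossing j = true) ∨
      (∃ j, 0 ≤ j ∧ j < 5 ∧ (∀ i, 0 ≤ i → i < j → completesAt state crossing i = true) ∧
        falseAt state crossing j = true) := by
    rcases hrun0 with hall | hex
    · rw [List.all_eq_true] at hall
      exact Or.inl (fun j _ hj => hall j (List.mem_range.mpr hj))
    · rw [List.any_eq_true] at hex
      obtain ⟨j, hjmem, hj⟩ := hex
      rw [Bool.and_eq_true, List.all_eq_true] at hj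
      exact Or.inr ⟨j, Nat.zero_le j, List.mem_range.mp hjmem,
        (fun i _ hij => hj.1 i (List.mem_range.mpr hij)), hj.2⟩
  have h05 : (pyM - 1 : Int) = 5 := by norm_num [pyM]
  show loopA state crossing (PySem.List.pyRange 0 (pyM - 1)) _ _ _
      = loopB state crossing (PySem.List.pyRange 0 (pyM - 1)) _ _
  rw [h05, show (0 : Int) = ((0 : Nat) : Int) from rfl]
  exact loop_eq state crossing 5 0 rfl _ _ _ _ hrun rfl hcurS hcl0 hcs1 hp0 hconn0
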